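-- pv_equiv track=rewrite | github.com/cas-bioinf/rboAnalyzer | rna_blast_analyze/BR_core/db2shape.py | _split_stems
-- ===== SOURCE A (Python) =====
-- def _split_stems(nest):
--     """split stems denoted in nesting vector and return spliced vectors with indices by one lower"""
--     # stems
--     st = [i for i, x in enumerate(nest) if x == nest[0]]
--     st.append(len(nest))
--     qq = []
--     for i in range(0,len(st)-1,2):
--         r = nest[st[i]:st[i+2]]
--         qq.append(r)
--     return qq
-- ===== SOURCE B (Python) =====
-- def _split_stems(nest):
--     """split stems denoted in nesting vector and return spliced vectors with indices by one lower"""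
--     if not nest:
--         return []
--     m = nest[0]
--     n = len(nest)
--     qq = []
--     start = 0
--     while start < n:
--         j = nest.index(m, start + 1)      # closing marker of the stem starting at `start`
--         try:
--             nxt = nest.index(m, j + 1)    # start of the next stem
--         except ValueError:
--             nxt = n
--         qq.append(nest[start:nxt])
--         start = nxt
--     return qq
-- ===== Notes on version B (the rewrite author's own statement) =====
-- stated objective: alternative
-- what changed: A precomputes the full table of marker positions (enumerate comprehension) and then slices the input between every other table entry; B makes no table: a while loop chases marker positions with list.index, finding each stem's closing marker and the next stem start, slicing stem by stem.
import Mathlib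
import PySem

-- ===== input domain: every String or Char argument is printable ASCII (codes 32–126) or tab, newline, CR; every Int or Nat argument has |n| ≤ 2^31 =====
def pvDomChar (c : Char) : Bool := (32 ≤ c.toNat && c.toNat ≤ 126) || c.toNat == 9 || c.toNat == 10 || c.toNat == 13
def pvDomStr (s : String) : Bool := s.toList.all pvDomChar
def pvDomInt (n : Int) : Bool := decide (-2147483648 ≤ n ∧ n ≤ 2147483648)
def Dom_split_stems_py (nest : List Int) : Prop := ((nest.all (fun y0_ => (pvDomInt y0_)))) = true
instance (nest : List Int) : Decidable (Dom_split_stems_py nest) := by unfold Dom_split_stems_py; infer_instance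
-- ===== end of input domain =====

-- B replaces A's precomputed index table of all marker positions (enumerate + pair slicing)
-- by a while loop that chases marker positions with list.index, slicing stem by stem
-- (objective: alternative).

-- ===== PORT A =====
-- literal port of A: st = marker-position table (+ len), then slices st[i]..st[i+2] for even i
def stTable (nest : List Int) : List Int :=
  ((PySem.List.enumerate nest).filter (fun p => p.2 == PySem.List.pyGetD nest 0 0)).map (fun p => p.1)
    ++ [(nest.length : Int)]

def split_stems_py (nest : List Int) : List (List Int) :=
  (PySem.List.pyRange 0 (((stTable nest).length : Int) - 1) 2).foldl
    (fun qq i =>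
      qq ++ [PySem.List.slice nest (some (PySem.List.pyGetD (stTable nest) i 0))
               (some (PySem.List.pyGetD (stTable nest) (i + 2) 0))])
    []

-- ===== PORT B =====
-- B walks the list chasing marker positions with list.index: nest.index(m, i)
def bFind (nest : List Int) (m : Int) (i : Nat) : Option Nat :=
  (PySem.List.index? (nest.drop i) m).map (fun k => k + i)

-- list.index returns an index at or after its start argument (used for termination)
theorem bFind_ge {nest : List Int} {m : Int} {i j : Nat} (h : bFind nest m i = some j) :
    i ≤ j := by
  rw [bFind] at h
  rcases Option.map_eq_some_iff.mp h with ⟨k, _, hk⟩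
  omega

-- the while loop: at each stem start, find the closing marker j, then the next stem
-- start (or n), slice, and continue there; none = Python's uncaught ValueError
def bGo (nest : List Int) (m : Int) (n : Nat) (start : Nat) : List (List Int) :=
  if _h : start < n then
    match h1 : bFind nest m (start + 1) with
    | none => []
    | some j =>
      match h2 : bFind nest m (j + 1) with
      | none => PySem.List.slice nest (some (start : Int)) (some (n : Int)) :: bGo nest m n n
      | some k => PySem.List.slice nest (some (start : Int)) (some (k : Int)) :: bGo nest m n k
  else []
termination_by n - start
decreasing_by
  · omega
  · have hj := bFind_ge h1
    have hk := bFind_ge h2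
    omega

def split_stems_py_alt (nest : List Int) : List (List Int) :=
  match nest with
  | [] => []
  | m :: _ => bGo nest m nest.length 0

-- ===== PRECONDITION & SPEC =====
-- Pre_ excludes exactly the inputs on which A raises IndexError (st[i+2] past the end):
-- nonempty lists whose first element occurs an odd number of times.
def Pre_split_stems_py (nest : List Int) : Prop := nest.count nest.headI % 2 = 0
instance (nest : List Int) : Decidable (Pre_split_stems_py nest) := by
  unfold Pre_split_stems_py; infer_instance

def pvWitness_split_stems_py : List Int := [1, 2, 2, 1, 3, 1, 4, 1]

def Spec_split_stems_py (nest : List Int) (out : List (List Int)) : Prop :=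
  out = split_stems_py_alt nest
instance (nest : List Int) (out : List (List Int)) : Decidable (Spec_split_stems_py nest out) := by
  unfold Spec_split_stems_py; infer_instance

-- ===== CLAIM (what is proved, stated in full; the proofs are below) =====
def Claim_equal_split_stems_py : Prop :=
  ∀ (nest : List Int), Dom_split_stems_py nest → Pre_split_stems_py nest →
    Spec_split_stems_py nest (split_stems_py nest)

-- ===== LEMMAS AND PROOFS =====

-- ---- position table (A side) ----
-- positions (as enumerate indices starting at s) of the marker m in xs
def P (m s : Int) (xs : List Int) : List Int :=
  ((PySem.List.enumerate xs s).filter (fun p => p.2 == m)).map (fun p => p.1)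

theorem P_nil (m s : Int) : P m s [] = [] := rfl

theorem P_cons (m s x : Int) (t : List Int) :
    P m s (x :: t) = if x = m then s :: P m (s + 1) t else P m (s + 1) t := by
  simp [P, PySem.List.enumerate_cons]
  by_cases h : x = m <;> simp [h]

theorem P_not_mem (m : Int) {u : List Int} (h : m ∉ u) : ∀ s, P m s u = [] := by
  induction u with
  | nil => intro s; rfl
  | cons x t ih =>
    intro s
    have hx : x ≠ m := by intro hxm; apply h; simp [hxm]
    rw [P_cons, if_neg hx]
    exact ih (fun hm => h (List.mem_cons_of_mem _ hm)) _

theorem P_append (m s : Int) (u v : List Int) :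
    P m s (u ++ v) = P m s u ++ P m (s + u.length) v := by
  simp [P, PySem.List.enumerate_append, List.filter_append]

theorem P_shift (m : Int) (xs : List Int) : ∀ s, P m s xs = (P m 0 xs).map (fun a => a + s) := by
  induction xs with
  | nil => intro s; rfl
  | cons x t ih =>
    intro s
    rw [P_cons, P_cons]
    simp only [zero_add]
    by_cases h : x = m
    · rw [if_pos h, if_pos h, ih (s + 1), ih 1, List.map_cons, List.map_map]
      simp only [List.cons.injEq]
      refine ⟨by omega, ?_⟩
      exact List.map_congr_left (fun a _ => by simp only [Function.comp_apply]; omega)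
    · rw [if_neg h, if_neg h, ih (s + 1), ih 1, List.map_map]
      exact List.map_congr_left (fun a _ => by simp only [Function.comp_apply]; omega)

theorem P_nonneg (m : Int) (xs : List Int) : ∀ s x, x ∈ P m s xs → s ≤ x := by
  induction xs with
  | nil => intro s x hx; simp [P_nil] at hx
  | cons y t ih =>
    intro s x hx
    rw [P_cons] at hx
    by_cases h : y = m
    · rw [if_pos h, List.mem_cons] at hx
      rcases hx with hx | hx
      · omega
      · have := ih (s + 1) x hx; omega
    · rw [if_neg h] at hx
      have := ih (s + 1) x hx; omega

-- ---- step-2 ranges ----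
theorem pr2_nil {a b : Int} (h : b ≤ a) : PySem.List.pyRange a b 2 = [] := by
  rw [PySem.List.pyRange_of_pos a b (by norm_num)]
  rw [if_neg (by omega)]
  simp

theorem pr2_cons {a b : Int} (h : a < b) :
    PySem.List.pyRange a b 2 = a :: PySem.List.pyRange (a + 2) b 2 := by
  rw [PySem.List.pyRange_of_pos a b (by norm_num),
      PySem.List.pyRange_of_pos (a + 2) b (by norm_num)]
  rw [if_pos h]
  have hc : ((b - a + 2 - 1) / 2).toNat
      = (if a + 2 < b then ((b - (a + 2) + 2 - 1) / 2).toNat else 0) + 1 := by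
    by_cases h2 : a + 2 < b
    · rw [if_pos h2]; omega
    · rw [if_neg h2]; omega
  rw [hc, List.range_succ_eq_map, List.map_cons, List.map_map]
  simp only [List.cons.injEq]
  refine ⟨by simp, ?_⟩
  exact List.map_congr_left (fun k _ => by
    simp only [Function.comp_apply, Nat.succ_eq_add_one]
    push_cast
    ring)

theorem pr2_shift (a b : Int) :
    PySem.List.pyRange (a + 2) b 2 = (PySem.List.pyRange a (b - 2) 2).map (fun i => i + 2) := by
  rw [PySem.List.pyRange_of_pos (a + 2) b (by norm_num),
      PySem.List.pyRange_of_pos a (b - 2) (by norm_num), List.map_map]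
  by_cases h : a < b - 2
  · rw [if_pos (by omega : a + 2 < b), if_pos h]
    have : b - (a + 2) + 2 - 1 = b - 2 - a + 2 - 1 := by omega
    rw [this]
    exact List.map_congr_left (fun k _ => by simp only [Function.comp_apply]; omega)
  · rw [if_neg (by omega : ¬ a + 2 < b), if_neg h]; simp

-- A's result as a map over the even positions of the table
theorem A_as_map (nest : List Int) :
    split_stems_py nest
      = (PySem.List.pyRange 0 (((stTable nest).length : Int) - 1) 2).map
          (fun i => PySem.List.slice nest
            (some (PySem.List.pyGetD (stTable nest) i 0))
            (some (PySem.List.pyGetD (stTable nest) (i + 2) 0))) := by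
  rw [split_stems_py]
  rw [PySem.List.foldl_append_singleton_eq_map
    (fun i => PySem.List.slice nest
      (some (PySem.List.pyGetD (stTable nest) i 0))
      (some (PySem.List.pyGetD (stTable nest) (i + 2) 0)))]
  rfl

-- shifted slice over an append
theorem slice_shift (u v : List Int) {a b : Int} (ha : 0 ≤ a) (hb : 0 ≤ b) :
    PySem.List.slice (u ++ v) (some (a + u.length)) (some (b + u.length))
      = PySem.List.slice v (some a) (some b) := by
  rw [PySem.List.slice_toNat _ (by omega) (by omega), PySem.List.slice_toNat _ ha hb]
  have h1 : (a + (u.length : Int)).toNat = a.toNat + u.length := by omega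
  have h2 : (b + (u.length : Int)).toNat = b.toNat + u.length := by omega
  rw [h1, h2, List.drop_append]
  have : a.toNat + u.length - u.length = a.toNat := by omega
  rw [this, List.drop_of_length_le (by omega)]
  simp
  omega

-- first-occurrence split
theorem first_split {m : Int} {t : List Int} (h : m ∈ t) :
    ∃ u v, t = u ++ m :: v ∧ m ∉ u := by
  induction t with
  | nil => simp at h
  | cons x t' ih =>
    by_cases hx : x = m
    · exact ⟨[], t', by rw [hx]; simp, by simp⟩
    · have hm : m ∈ t' := by
        rcases List.mem_cons.mp h with h1 | h1
        · exact absurd h1.symm hx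
        · exact h1
      rcases ih hm with ⟨u, v, huv, hnu⟩
      refine ⟨x :: u, v, by rw [huv]; simp, ?_⟩
      intro hmem
      rcases List.mem_cons.mp hmem with h1 | h1
      · exact hx h1.symm
      · exact hnu h1

-- ---- assorted small helpers ----
theorem stTable_as_P (xs : List Int) :
    stTable xs = P (PySem.List.pyGetD xs 0 0) 0 xs ++ [(xs.length : Int)] := rfl

theorem stTable_nonneg (xs : List Int) : ∀ x ∈ stTable xs, 0 ≤ x := by
  intro x hx
  rw [stTable_as_P] at hx
  rcases List.mem_append.mp hx with h | h
  · exact P_nonneg _ _ 0 x h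
  · simp at h
    omega

theorem stTable_ne_nil (xs : List Int) : stTable xs ≠ [] := by
  rw [stTable_as_P]
  simp

theorem slice_zero_end (xs : List Int) {a : Int} (ha : 0 ≤ a) :
    PySem.List.slice xs (some a) (some 0) = [] := by
  rw [PySem.List.slice_toNat _ ha le_rfl]
  simp

-- ---- B-side: index computations ----
theorem index?_first {m : Int} {u : List Int} (hm : m ∉ u) :
    ∀ w, PySem.List.index? (u ++ m :: w) m = some u.length := by
  induction u with
  | nil => intro w; exact PySem.List.index?_cons_self m w
  | cons x u' ih =>
    intro w
    have hx : x ≠ m := fun hxe => hm (by simp [hxe])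
    rw [List.cons_append, PySem.List.index?_cons_of_ne _ hx,
        ih (fun hmem => hm (List.mem_cons_of_mem _ hmem)) w]
    rfl

theorem bFind_eq {nest : List Int} {i : Nat} {u w : List Int} {m : Int}
    (hd : nest.drop i = u ++ m :: w) (hm : m ∉ u) :
    bFind nest m i = some (u.length + i) := by
  rw [bFind, hd, index?_first hm w]
  rfl

theorem bFind_none {nest : List Int} {i : Nat} {m : Int} (h : m ∉ nest.drop i) :
    bFind nest m i = none := by
  rw [bFind, (PySem.List.index?_eq_none_iff _ _).mpr h]
  rfl

theorem bGo_stop (nest : List Int) (m : Int) (n start : Nat) (h : ¬ start < n) :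
    bGo nest m n start = [] := by
  rw [bGo, dif_neg h]

theorem bFind_append (seg rest : List Int) (m : Int) (i : Nat) :
    bFind (seg ++ rest) m (seg.length + i) = (bFind rest m i).map (fun x => x + seg.length) := by
  rw [bFind, bFind, List.drop_append, List.drop_of_length_le (by omega),
      show seg.length + i - seg.length = i by omega, List.nil_append]
  rcases PySem.List.index? (rest.drop i) m with _ | k
  · rfl
  · simp
    omega

theorem slice_shift_nat (u v : List Int) (a b : Nat) :
    PySem.List.slice (u ++ v) (some ((u.length + a : Nat) : Int)) (some ((u.length + b : Nat) : Int))
      = PySem.List.slice v (some (a : Int)) (some (b : Int)) := by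
  rw [show ((u.length + a : Nat) : Int) = (a : Int) + (u.length : Int) by push_cast; ring,
      show ((u.length + b : Nat) : Int) = (b : Int) + (u.length : Int) by push_cast; ring]
  exact slice_shift u v (Int.natCast_nonneg a) (Int.natCast_nonneg b)

-- B's loop on a shifted suffix: processing (seg ++ rest) from seg.length + s is
-- processing rest from s
theorem bGo_shift (seg rest : List Int) (m : Int) :
    ∀ (M s : Nat), rest.length - s ≤ M →
      bGo (seg ++ rest) m (seg ++ rest).length (seg.length + s) = bGo rest m rest.length s := by
  intro M
  induction M with
  | zero =>
    intro s hM
    by_cases hs : s < rest.length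
    · omega
    · rw [bGo_stop _ _ _ _ (by simp [List.length_append]; omega), bGo_stop _ _ _ _ hs]
  | succ M IH =>
    intro s hM
    by_cases hs : s < rest.length
    · conv_lhs => rw [bGo]
      conv_rhs => rw [bGo]
      rw [dif_pos (by simp [List.length_append]; omega : seg.length + s < (seg ++ rest).length),
          dif_pos hs]
      have hb1 := bFind_append seg rest m (s + 1)
      rw [show seg.length + s + 1 = seg.length + (s + 1) by omega, hb1]
      rcases h1 : bFind rest m (s + 1) with _ | j
      · rfl
      · simp only [Option.map_some]
        have hb2 := bFind_append seg rest m (j + 1)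
        rw [show j + seg.length + 1 = seg.length + (j + 1) by omega, hb2]
        rcases h2 : bFind rest m (j + 1) with _ | k
        · simp only [Option.map_none]
          have hrec := IH rest.length (by omega)
          simp only [List.length_append] at hrec ⊢
          rw [slice_shift_nat seg rest s rest.length, hrec]
        · simp only [Option.map_some]
          have hsj := bFind_ge h1
          have hjk := bFind_ge h2
          rw [show k + seg.length = seg.length + k by omega,
              slice_shift_nat seg rest s k, IH k (by omega)]
    · rw [bGo_stop _ _ _ _ (by simp [List.length_append]; omega), bGo_stop _ _ _ _ hs]

-- ---- B-side base and peel ----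
theorem B_base (m : Int) (u1 t2 : List Int) (h1 : m ∉ u1) (h2 : m ∉ t2) :
    split_stems_py_alt (m :: (u1 ++ m :: t2)) = [m :: (u1 ++ m :: t2)] := by
  have hf1 : bFind (m :: (u1 ++ m :: t2)) m 1 = some (u1.length + 1) :=
    bFind_eq (by rw [List.drop_one, List.tail_cons]) h1
  have hf2 : bFind (m :: (u1 ++ m :: t2)) m (u1.length + 1 + 1) = none := by
    apply bFind_none
    rw [show m :: (u1 ++ m :: t2) = (m :: (u1 ++ [m])) ++ t2 by simp,
        List.drop_left' (by simp)]
    exact h2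
  simp only [split_stems_py_alt]
  rw [bGo, dif_pos (by simp)]
  split
  · next heq =>
    rw [show (0 : Nat) + 1 = 1 from rfl, hf1] at heq
    simp at heq
  · next j heq =>
    rw [show (0 : Nat) + 1 = 1 from rfl, hf1] at heq
    have hj : j = u1.length + 1 := (Option.some.inj heq).symm
    subst hj
    split
    · next _ =>
      rw [bGo_stop _ _ _ _ (lt_irrefl _)]
      simp only [Nat.cast_zero, PySem.List.slice_zero_start, PySem.List.slice_to_natCast,
        List.take_length]
    · next k heq2 =>
      rw [hf2] at heq2
      simp at heq2

theorem B_peel (m : Int) (u1 u2 t3 : List Int) (h1 : m ∉ u1) (h2 : m ∉ u2) :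
    split_stems_py_alt (m :: (u1 ++ m :: (u2 ++ m :: t3)))
      = (m :: (u1 ++ m :: u2)) :: split_stems_py_alt (m :: t3) := by
  have hf1 : bFind (m :: (u1 ++ m :: (u2 ++ m :: t3))) m 1 = some (u1.length + 1) :=
    bFind_eq (by rw [List.drop_one, List.tail_cons]) h1
  have hf2 : bFind (m :: (u1 ++ m :: (u2 ++ m :: t3))) m (u1.length + 1 + 1)
      = some (u2.length + (u1.length + 1 + 1)) := by
    have hd : (m :: (u1 ++ m :: (u2 ++ m :: t3))).drop (u1.length + 1 + 1) = u2 ++ m :: t3 := by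
      rw [show m :: (u1 ++ m :: (u2 ++ m :: t3)) = (m :: (u1 ++ [m])) ++ (u2 ++ m :: t3) by simp,
          List.drop_left' (by simp)]
    exact bFind_eq hd h2
  have hseg : m :: (u1 ++ m :: (u2 ++ m :: t3)) = (m :: (u1 ++ m :: u2)) ++ (m :: t3) := by
    simp
  simp only [split_stems_py_alt]
  rw [bGo, dif_pos (by simp)]
  split
  · next heq =>
    rw [show (0 : Nat) + 1 = 1 from rfl, hf1] at heq
    simp at heq
  · next j heq =>
    rw [show (0 : Nat) + 1 = 1 from rfl, hf1] at heq
    have hj : j = u1.length + 1 := (Option.some.inj heq).symm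
    subst hj
    split
    · next heq2 =>
      rw [hf2] at heq2
      simp at heq2
    · next k heq2 =>
      rw [hf2] at heq2
      have hk : k = u2.length + (u1.length + 1 + 1) := (Option.some.inj heq2).symm
      subst hk
      have hslice : PySem.List.slice (m :: (u1 ++ m :: (u2 ++ m :: t3)))
          (some ((0 : Nat) : Int)) (some ((u2.length + (u1.length + 1 + 1) : Nat) : Int))
          = m :: (u1 ++ m :: u2) := by
        simp only [Nat.cast_zero, PySem.List.slice_zero_start, PySem.List.slice_to_natCast]
        rw [hseg, show u2.length + (u1.length + 1 + 1) = (m :: (u1 ++ m :: u2)).length by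
          simp; omega, List.take_left]
      have hgo : bGo (m :: (u1 ++ m :: (u2 ++ m :: t3))) m
            (m :: (u1 ++ m :: (u2 ++ m :: t3))).length (u2.length + (u1.length + 1 + 1))
          = bGo (m :: t3) m (m :: t3).length 0 := by
        rw [hseg, show u2.length + (u1.length + 1 + 1) = (m :: (u1 ++ m :: u2)).length + 0 by
          simp; omega]
        exact bGo_shift (m :: (u1 ++ m :: u2)) (m :: t3) m (m :: t3).length 0 (by omega)
      rw [hgo]
      exact congrArg₂ List.cons hslice rfl

-- ---- A-side table shapes ----
theorem stTable_base (m : Int) (u1 t2 : List Int) (h1 : m ∉ u1) (h2 : m ∉ t2) :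
    stTable (m :: (u1 ++ m :: t2))
      = [0, 1 + (u1.length : Int), ((m :: (u1 ++ m :: t2)).length : Int)] := by
  rw [stTable_as_P, PySem.List.pyGetD_zero_cons, P_cons, if_pos rfl, P_append,
      P_not_mem m h1, P_cons, if_pos rfl, P_not_mem m h2]
  simp

theorem stTable_peel (m : Int) (u1 u2 t3 : List Int) (h1 : m ∉ u1) (h2 : m ∉ u2) :
    stTable (m :: (u1 ++ m :: (u2 ++ m :: t3)))
      = 0 :: (1 + (u1.length : Int))
          :: (stTable (m :: t3)).map (fun a => a + (2 + (u1.length : Int) + (u2.length : Int))) := by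
  rw [stTable_as_P, PySem.List.pyGetD_zero_cons, P_cons, if_pos rfl, P_append,
      P_not_mem m h1, P_cons, if_pos rfl, P_append, P_not_mem m h2]
  rw [P_shift m (m :: t3)]
  rw [stTable_as_P, PySem.List.pyGetD_zero_cons]
  simp only [List.nil_append, List.cons_append, List.map_append]
  have hlen : ((m :: (u1 ++ m :: (u2 ++ m :: t3))).length : Int)
      = ((m :: t3).length : Int) + (2 + (u1.length : Int) + (u2.length : Int)) := by
    simp
    omega
  rw [hlen]
  simp only [List.map_cons, List.map_nil, List.cons.injEq]
  refine ⟨trivial, by ring, ?_⟩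
  refine congrArg₂ (· ++ ·) (List.map_congr_left (fun a _ => by ring)) rfl

-- ---- A-side base and peel ----
theorem A_base (m : Int) (u1 t2 : List Int) (h1 : m ∉ u1) (h2 : m ∉ t2) :
    split_stems_py (m :: (u1 ++ m :: t2)) = [m :: (u1 ++ m :: t2)] := by
  rw [A_as_map, stTable_base m u1 t2 h1 h2]
  have hlen : ((([0, 1 + (u1.length : Int), ((m :: (u1 ++ m :: t2)).length : Int)] : List Int).length : Int)) - 1 = 2 := by
    simp
  rw [hlen, pr2_cons (by norm_num : (0:Int) < 2),
      show ((0:Int) + 2) = 2 by norm_num, pr2_nil (le_refl (2:Int))]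
  simp only [List.map_cons, List.map_nil]
  have hget0 : PySem.List.pyGetD ([0, 1 + (u1.length : Int), ((m :: (u1 ++ m :: t2)).length : Int)] : List Int) 0 0 = 0 :=
    PySem.List.pyGetD_zero_cons _ _ _
  have hget2 : PySem.List.pyGetD ([0, 1 + (u1.length : Int), ((m :: (u1 ++ m :: t2)).length : Int)] : List Int) (0 + 2) 0
      = ((m :: (u1 ++ m :: t2)).length : Int) := by
    norm_num
    rw [show ((2:Int)) = ((2:Nat):Int) by norm_num, PySem.List.pyGetD_natCast]
    rfl
  rw [hget0, hget2]
  rw [PySem.List.slice_zero_start, PySem.List.slice_to_natCast, List.take_length]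

theorem A_peel (m : Int) (u1 u2 t3 : List Int) (h1 : m ∉ u1) (h2 : m ∉ u2) :
    split_stems_py (m :: (u1 ++ m :: (u2 ++ m :: t3)))
      = (m :: (u1 ++ m :: u2)) :: split_stems_py (m :: t3) := by
  have hR := stTable_ne_nil (m :: t3)
  set R := stTable (m :: t3) with hRdef
  set i2 : Int := 2 + (u1.length : Int) + (u2.length : Int) with hi2
  set nest := m :: (u1 ++ m :: (u2 ++ m :: t3)) with hnest
  have hseg : nest = (m :: (u1 ++ m :: u2)) ++ (m :: t3) := by
    rw [hnest]; simp
  have hst := stTable_peel m u1 u2 t3 h1 h2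
  rw [A_as_map nest, A_as_map (m :: t3), hst]
  have hlen1 : (((0 : Int) :: (1 + (u1.length : Int)) :: R.map (fun a => a + i2)).length : Int) - 1
      = ((R.length : Int) + 1) := by
    simp
  rw [hlen1]
  have hRpos : 0 < (R.length : Int) := by
    have : R ≠ [] := hR
    have : 0 < R.length := List.length_pos_iff.mpr this
    omega
  rw [pr2_cons (by omega : (0:Int) < (R.length : Int) + 1)]
  rw [show ((0:Int) + 2) = 0 + 2 from rfl]
  rw [pr2_shift 0 ((R.length : Int) + 1)]
  have hsub : ((R.length : Int) + 1 - 2) = (R.length : Int) - 1 := by omega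
  rw [hsub]
  simp only [List.map_cons, List.map_map]
  -- the head slice is the first segment
  have hhead : PySem.List.slice nest
      (some (PySem.List.pyGetD ((0 : Int) :: (1 + (u1.length : Int)) :: R.map (fun a => a + i2)) 0 0))
      (some (PySem.List.pyGetD ((0 : Int) :: (1 + (u1.length : Int)) :: R.map (fun a => a + i2)) (0 + 2) 0))
      = m :: (u1 ++ m :: u2) := by
    rw [PySem.List.pyGetD_zero_cons]
    have hR0 : R = 0 :: (P m 1 t3 ++ [((m :: t3).length : Int)]) := by
      rw [hRdef, stTable_as_P, PySem.List.pyGetD_zero_cons, P_cons, if_pos rfl]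
      simp
    have hg2 : PySem.List.pyGetD ((0 : Int) :: (1 + (u1.length : Int)) :: R.map (fun a => a + i2)) (0 + 2) 0
        = i2 := by
      norm_num
      rw [show ((2:Int)) = ((2:Nat):Int) by norm_num, PySem.List.pyGetD_natCast]
      rw [hR0]
      simp
    rw [hg2, PySem.List.slice_zero_start]
    have hi2nat : i2 = (((m :: (u1 ++ m :: u2)) : List Int).length : Int) := by
      rw [hi2]; simp; omega
    rw [hi2nat, PySem.List.slice_to_natCast, hseg, List.take_left]
  rw [hhead]
  -- the remaining slices match A on (m :: t3)
  refine congrArg₂ List.cons rfl (List.map_congr_left ?_)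
  intro i hi
  have hiR : 0 ≤ i ∧ i < (R.length : Int) - 1 := by
    have := (PySem.List.mem_pyRange_iff_of_pos (by norm_num : (0:Int) < 2) i).mp hi
    exact ⟨this.1, this.2.1⟩
  obtain ⟨hi0, hilt⟩ := hiR
  obtain ⟨j, rfl⟩ : ∃ j : Nat, i = (j : Int) := ⟨i.toNat, (Int.toNat_of_nonneg hi0).symm⟩
  have hjlt : j + 1 < R.length := by omega
  simp only [Function.comp_apply]
  -- index computations
  have hidx1 : PySem.List.pyGetD ((0 : Int) :: (1 + (u1.length : Int)) :: R.map (fun a => a + i2)) ((j : Int) + 2) 0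
      = R[j]'(by omega) + i2 := by
    rw [show ((j : Int) + 2) = (((j + 2 : Nat)) : Int) by push_cast; ring, PySem.List.pyGetD_natCast]
    rw [List.getD_eq_getElem?_getD]
    simp only [List.getElem?_cons_succ]
    rw [List.getElem?_map, List.getElem?_eq_getElem (by omega : j < R.length)]
    rfl
  have hidx1' : PySem.List.pyGetD R (j : Int) 0 = R[j]'(by omega) := by
    rw [PySem.List.pyGetD_natCast, List.getD_eq_getElem?_getD,
        List.getElem?_eq_getElem (by omega : j < R.length)]
    rfl
  have hnn : 0 ≤ R[j]'(by omega) := stTable_nonneg _ _ (List.getElem_mem _)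
  by_cases hj2 : j + 2 < R.length
  · have hidx2 : PySem.List.pyGetD ((0 : Int) :: (1 + (u1.length : Int)) :: R.map (fun a => a + i2)) ((j : Int) + 2 + 2) 0
        = R[j+2]'hj2 + i2 := by
      rw [show ((j : Int) + 2 + 2) = (((j + 4 : Nat)) : Int) by push_cast; ring, PySem.List.pyGetD_natCast]
      rw [List.getD_eq_getElem?_getD]
      simp only [List.getElem?_cons_succ]
      rw [List.getElem?_map, List.getElem?_eq_getElem (by omega : j + 2 < R.length)]
      rfl
    have hidx2' : PySem.List.pyGetD R ((j : Int) + 2) 0 = R[j+2]'hj2 := by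
      rw [show ((j : Int) + 2) = (((j + 2 : Nat)) : Int) by push_cast; ring, PySem.List.pyGetD_natCast]
      rw [List.getD_eq_getElem?_getD, List.getElem?_eq_getElem hj2]
      rfl
    rw [hidx1, hidx2, hidx1', hidx2']
    have hnn2 : 0 ≤ R[j+2]'hj2 := stTable_nonneg _ _ (List.getElem_mem _)
    have hi2len : i2 = (((m :: (u1 ++ m :: u2)) : List Int).length : Int) := by
      rw [hi2]; simp; omega
    rw [hseg, hi2len]
    exact slice_shift _ _ hnn hnn2
  · have hidx2 : PySem.List.pyGetD ((0 : Int) :: (1 + (u1.length : Int)) :: R.map (fun a => a + i2)) ((j : Int) + 2 + 2) 0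
        = 0 := by
      rw [show ((j : Int) + 2 + 2) = (((j + 4 : Nat)) : Int) by push_cast; ring, PySem.List.pyGetD_natCast]
      rw [List.getD_eq_getElem?_getD]
      simp only [List.getElem?_cons_succ]
      rw [List.getElem?_map, List.getElem?_eq_none (by omega)]
      rfl
    have hidx2' : PySem.List.pyGetD R ((j : Int) + 2) 0 = 0 := by
      rw [show ((j : Int) + 2) = (((j + 2 : Nat)) : Int) by push_cast; ring, PySem.List.pyGetD_natCast]
      rw [List.getD_eq_getElem?_getD, List.getElem?_eq_none (by omega)]
      rfl
    rw [hidx1, hidx2, hidx1', hidx2']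
    rw [slice_zero_end _ (by omega), slice_zero_end _ hnn]

-- main equivalence, by strong induction on the length
theorem main_equiv : ∀ (N : Nat) (nest : List Int), nest.length ≤ N →
    nest.count nest.headI % 2 = 0 → split_stems_py nest = split_stems_py_alt nest := by
  intro N
  induction N with
  | zero =>
    intro nest hlen _
    have h0 : nest = [] := List.eq_nil_of_length_eq_zero (Nat.le_zero.mp hlen)
    subst h0
    rfl
  | succ N IH =>
    intro nest hlen hpre
    rcases nest with _ | ⟨m, t⟩
    · rfl
    · simp only [List.headI] at hpre
      have hct : t.count m % 2 = 1 := by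
        rw [List.count_cons_self] at hpre
        omega
      have hmem : m ∈ t := by
        by_contra hnm
        rw [List.count_eq_zero.mpr hnm] at hct
        omega
      rcases first_split hmem with ⟨u1, t2, ht, hu1⟩
      subst ht
      have hcu1 : u1.count m = 0 := List.count_eq_zero.mpr hu1
      have hct2 : t2.count m % 2 = 0 := by
        rw [List.count_append, List.count_cons_self] at hct
        omega
      by_cases h2 : m ∈ t2
      · rcases first_split h2 with ⟨u2, t3, ht2, hu2⟩
        subst ht2
        have hcu2 : u2.count m = 0 := List.count_eq_zero.mpr hu2
        rw [A_peel m u1 u2 t3 hu1 hu2, B_peel m u1 u2 t3 hu1 hu2]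
        have hrec : split_stems_py (m :: t3) = split_stems_py_alt (m :: t3) := by
          apply IH (m :: t3)
          · simp only [List.length_cons, List.length_append] at hlen ⊢
            omega
          · show List.count (m :: t3).headI (m :: t3) % 2 = 0
            have hh : (m :: t3).headI = m := rfl
            rw [hh, List.count_cons_self]
            rw [List.count_append, List.count_cons_self] at hct2
            omega
        rw [hrec]
      · have hnm2 : m ∉ t2 := h2
        rw [A_base m u1 t2 hu1 hnm2, B_base m u1 t2 hu1 hnm2]

-- ===== VERDICT (by name: the statement is the Claim_ definition above) =====
theorem split_stems_py_spec : Claim_equal_split_stems_py := by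
  intro nest _ hpre
  unfold Spec_split_stems_py
  exact main_equiv nest.length nest le_rfl hpre
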